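-- pv_equiv track=rewrite | github.com/nareohanyan/SmartRest_AI-Agent | app/agent/graph_support.py | _normalize_branch_ids
-- ===== SOURCE A (Python) =====
-- def _parse_branch_id(raw_branch_id: str) -> int | None:
--     normalized = raw_branch_id.strip()
--     if normalized.startswith("branch_"):
--         normalized = normalized[len("branch_") :]
--     try:
--         return int(normalized)
--     except ValueError:
--         return None
--
-- def _normalize_branch_ids(raw_branch_ids: list[str] | None) -> list[int]:
--     if not raw_branch_ids:
--         return []
--
--     branch_ids: list[int] = []
--     seen: set[int] = set()
--     for raw_branch_id in raw_branch_ids: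
--         parsed = _parse_branch_id(raw_branch_id)
--         if parsed is None or parsed in seen:
--             continue
--         seen.add(parsed)
--         branch_ids.append(parsed)
--     return branch_ids
-- ===== SOURCE B (Python) =====
-- def _parse_branch_id(raw_branch_id: str) -> int | None:
--     normalized = raw_branch_id.strip()
--     if normalized.startswith("branch_"):
--         normalized = normalized[len("branch_") :]
--     try:
--         return int(normalized)
--     except ValueError:
--         return None
--
-- def _normalize_branch_ids(raw_branch_ids: list[str] | None) -> list[int]:
--     # Build the answer back-to-front: walk the input reversed; each parsed id is
--     # prepended and its duplicates are filtered out of the partial result.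
--     out: list[int] = []
--     for raw_branch_id in reversed(raw_branch_ids or []):
--         parsed = _parse_branch_id(raw_branch_id)
--         if parsed is not None:
--             out = [parsed] + [x for x in out if x != parsed]
--     return out
-- ===== Notes on version B (the rewrite author's own statement) =====
-- stated objective: alternative
-- what changed: Instead of a forward loop with a seen-set, B builds the result back-to-front: it walks the input reversed and, for each parsed id, prepends it while filtering its duplicates out of the partial result, so deduplication happens by list filtering with no auxiliary set or dict; trades the O(1) seen-lookup for an O(d) filter per kept element.
import Mathlib
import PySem

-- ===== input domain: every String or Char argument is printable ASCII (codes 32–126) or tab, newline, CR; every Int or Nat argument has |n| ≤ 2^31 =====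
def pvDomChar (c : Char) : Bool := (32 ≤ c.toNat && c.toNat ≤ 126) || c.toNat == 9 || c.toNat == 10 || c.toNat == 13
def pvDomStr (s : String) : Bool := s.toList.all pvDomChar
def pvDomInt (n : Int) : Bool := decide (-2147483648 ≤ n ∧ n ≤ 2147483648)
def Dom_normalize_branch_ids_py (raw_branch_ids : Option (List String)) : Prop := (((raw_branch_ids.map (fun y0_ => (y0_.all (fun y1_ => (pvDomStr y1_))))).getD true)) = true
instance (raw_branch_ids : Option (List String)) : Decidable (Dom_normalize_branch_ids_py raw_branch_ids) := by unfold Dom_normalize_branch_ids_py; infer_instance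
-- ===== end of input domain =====

-- B replaces A's forward loop with a seen-set by a back-to-front build: it walks the input
-- reversed and dedups by filtering each parsed id's duplicates out of the partial result.

-- shared module helper _parse_branch_id (used by both Pythons)
def parse_branch_id_py (raw_branch_id : String) : Option Int :=
  let normalized := PySem.Str.strip raw_branch_id
  let normalized :=
    if PySem.Str.startswith normalized "branch_" then PySem.Str.slice normalized (some 7) none
    else normalized
  PySem.Int.ofStr? normalized

-- ===== PORT A =====
def normalize_branch_ids_py (raw_branch_ids : Option (List String)) : List Int :=
  match raw_branch_ids with
  | none => []
  | some l =>
    if l = [] then []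
    else
      (l.foldl
        (fun (st : List Int × PySem.Set Int) raw_branch_id =>
          match parse_branch_id_py raw_branch_id with
          | none => st
          | some parsed =>
            if PySem.Set.contains st.2 parsed then st
            else (st.1 ++ [parsed], PySem.Set.add st.2 parsed))
        ([], PySem.Set.empty)).1

-- ===== PORT B =====
def normalize_branch_ids_py_alt (raw_branch_ids : Option (List String)) : List Int :=
  ((raw_branch_ids.getD []).reverse).foldl
    (fun (out : List Int) raw_branch_id =>
      match parse_branch_id_py raw_branch_id with
      | none => out
      | some parsed => parsed :: out.filter (fun x => x != parsed))
    []

-- ===== PRECONDITION & SPEC =====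
def Spec_normalize_branch_ids_py (raw_branch_ids : Option (List String)) (out : List Int) : Prop := out = normalize_branch_ids_py_alt raw_branch_ids
instance (raw_branch_ids : Option (List String)) (out : List Int) : Decidable (Spec_normalize_branch_ids_py raw_branch_ids out) := by unfold Spec_normalize_branch_ids_py; infer_instance

-- ===== CLAIM (what is proved, stated in full; the proofs are below) =====
def Claim_equal_normalize_branch_ids_py : Prop := ∀ (raw_branch_ids : Option (List String)), Dom_normalize_branch_ids_py raw_branch_ids → Spec_normalize_branch_ids_py raw_branch_ids (normalize_branch_ids_py raw_branch_ids)

-- ===== LEMMAS AND PROOFS =====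

-- the back-to-front dedup step, as a foldr over parsed ids
def gDedup (ps : List Int) : List Int :=
  ps.foldr (fun p out => p :: out.filter (fun x => x != p)) []

-- A's loop, run from a diagonal state (list = seen set), returns seen.update(parsed ids).
theorem loop_diag (l : List String) (s : PySem.Set Int) :
    (l.foldl
        (fun (st : List Int × PySem.Set Int) raw_branch_id =>
          match parse_branch_id_py raw_branch_id with
          | none => st
          | some parsed =>
            if PySem.Set.contains st.2 parsed then st
            else (st.1 ++ [parsed], PySem.Set.add st.2 parsed))
        (s, s)).1
      = (l.filterMap parse_branch_id_py).foldl PySem.Set.add s := by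
  induction l generalizing s with
  | nil => rfl
  | cons r l ih =>
    simp only [List.foldl_cons, List.filterMap_cons]
    cases h : parse_branch_id_py r with
    | none => simpa using ih s
    | some p =>
      by_cases hp : p ∈ s
      · have hc : PySem.Set.contains s p = true := by simp [hp]
        have hadd : PySem.Set.add s p = s := PySem.Set.add_of_mem hp
        simp only [List.foldl_cons, hc, if_true, hadd]
        exact ih s
      · have hc : PySem.Set.contains s p = false := by simp [hp]
        have hadd : PySem.Set.add s p = s ++ [p] := PySem.Set.add_of_not_mem hp
        simp only [List.foldl_cons, hc, if_false, Bool.false_eq_true, hadd]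
        simpa [hadd] using ih (PySem.Set.add s p)

-- folding Set.add from s over ps appends exactly the back-to-front dedup of ps, minus s
theorem foldl_add_eq_gDedup (ps : List Int) (s : List Int) :
    ps.foldl PySem.Set.add s = s ++ (gDedup ps).filter (fun x => !(s.contains x)) := by
  induction ps generalizing s with
  | nil => simp [gDedup]
  | cons p ps ih =>
    simp only [List.foldl_cons, gDedup, List.foldr_cons]
    by_cases hp : p ∈ s
    · have hadd : PySem.Set.add s p = s := PySem.Set.add_of_mem hp
      rw [hadd, ih s]
      have hc : s.contains p = true := by simpa using hp
      simp only [List.filter_cons, hc, Bool.not_true, Bool.false_eq_true, if_false,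
        List.filter_filter]
      congr 1
      apply List.filter_congr
      intro x _
      by_cases hx : x = p
      · subst hx; simp [hp]
      · simp [hx]
    · have hadd : PySem.Set.add s p = s ++ [p] := PySem.Set.add_of_not_mem hp
      rw [hadd, ih (s ++ [p])]
      have hc : s.contains p = false := by simpa using hp
      simp only [List.filter_cons, hc, Bool.not_false, if_true, List.filter_filter,
        List.append_assoc, List.cons_append, List.nil_append]
      congr 2
      apply List.filter_congr
      intro x _
      by_cases hx : x = p
      · subst hx; simp
      · simp [hx]

-- B's reversed loop computes gDedup of the parsed ids
theorem foldr_eq_gDedup (l : List String) :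
    l.foldr
        (fun raw_branch_id (out : List Int) =>
          match parse_branch_id_py raw_branch_id with
          | none => out
          | some parsed => parsed :: out.filter (fun x => x != parsed))
        []
      = gDedup (l.filterMap parse_branch_id_py) := by
  induction l with
  | nil => rfl
  | cons r l ih =>
    simp only [List.foldr_cons, List.filterMap_cons]
    cases h : parse_branch_id_py r with
    | none => simpa using ih
    | some p => simp [gDedup, ih]

-- ===== VERDICT (by name: the statement is the Claim_ definition above) =====
theorem normalize_branch_ids_py_spec : Claim_equal_normalize_branch_ids_py := by
  intro raw _
  unfold Spec_normalize_branch_ids_py normalize_branch_ids_py normalize_branch_ids_py_alt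
  cases raw with
  | none => rfl
  | some l =>
    by_cases hl : l = []
    · subst hl; rfl
    · simp only [hl, if_false, Option.getD_some, List.foldl_reverse]
      have hB := foldr_eq_gDedup l
      have hA := loop_diag l PySem.Set.empty
      have hM := foldl_add_eq_gDedup (l.filterMap parse_branch_id_py) []
      simp only [PySem.Set.empty] at hA ⊢
      rw [hA, hM]
      simp [hB]
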